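-- pv_equiv track=rewrite | github.com/SanchitKulkarni1/gitEQ | backend/app/analysis/layer_inference.py | infer_frontend_layers
-- ===== SOURCE A (Python) =====
-- def infer_frontend_layers(files):
--     layers = {
--         "ui": [],
--         "hooks": [],
--         "pages": [],
--         "utils": [],
--         "unknown": [],
--     }
--
--     for f in files:
--         if "/ui/" in f or "/components/" in f:
--             layers["ui"].append(f)
--         elif "/hooks/" in f:
--             layers["hooks"].append(f)
--         elif "/pages/" in f:
--             layers["pages"].append(f)
--         elif "/lib/" in f or "/utils/" in f:
--             layers["utils"].append(f)
--         else:
--             layers["unknown"].append(f)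
--
--     return layers
-- ===== SOURCE B (Python) =====
-- def infer_frontend_layers(files):
--     def _bucket(f):
--         if "/ui/" in f or "/components/" in f:
--             return "ui"
--         if "/hooks/" in f:
--             return "hooks"
--         if "/pages/" in f:
--             return "pages"
--         if "/lib/" in f or "/utils/" in f:
--             return "utils"
--         return "unknown"
--
--     return {name: [f for f in files if _bucket(f) == name]
--             for name in ("ui", "hooks", "pages", "utils", "unknown")}
-- ===== Notes on version B (the rewrite author's own statement) =====
-- stated objective: alternative
-- what changed: Instead of one pass that appends each file into a mutable dict of buckets, B classifies with a pure bucket function and builds each of the five buckets by its own filter pass over the files (staged per-bucket passes, no mutable accumulator).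
import Mathlib
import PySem

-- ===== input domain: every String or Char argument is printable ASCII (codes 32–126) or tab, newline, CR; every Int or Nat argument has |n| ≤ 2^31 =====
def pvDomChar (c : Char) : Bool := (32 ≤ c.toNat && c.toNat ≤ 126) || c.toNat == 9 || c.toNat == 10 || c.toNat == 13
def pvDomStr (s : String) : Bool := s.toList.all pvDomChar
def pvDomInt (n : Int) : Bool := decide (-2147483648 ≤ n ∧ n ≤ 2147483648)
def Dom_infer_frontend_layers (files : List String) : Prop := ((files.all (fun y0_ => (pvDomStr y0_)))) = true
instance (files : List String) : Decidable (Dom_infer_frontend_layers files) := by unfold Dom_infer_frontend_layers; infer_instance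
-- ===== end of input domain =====

-- B classifies with a pure bucket function and builds each bucket by its own filter pass,
-- instead of A's single pass appending into a mutable dict (alternative decomposition; same cost).

-- ===== PORT A =====
def infer_frontend_layers (files : List String) : List (String × List String) :=
  (files.foldl (fun layers f =>
      if PySem.Str.isIn "/ui/" f || PySem.Str.isIn "/components/" f then
        layers.modify "ui" [] (· ++ [f])
      else if PySem.Str.isIn "/hooks/" f then
        layers.modify "hooks" [] (· ++ [f])
      else if PySem.Str.isIn "/pages/" f then
        layers.modify "pages" [] (· ++ [f])
      else if PySem.Str.isIn "/lib/" f || PySem.Str.isIn "/utils/" f then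
        layers.modify "utils" [] (· ++ [f])
      else
        layers.modify "unknown" [] (· ++ [f]))
    (PySem.Dict.ofList [("ui", []), ("hooks", []), ("pages", []), ("utils", []), ("unknown", [])])).items

-- ===== PORT B =====
-- _bucket of Source B: the pure classification of one file path.
def pvBucket (f : String) : String :=
  if PySem.Str.isIn "/ui/" f || PySem.Str.isIn "/components/" f then "ui"
  else if PySem.Str.isIn "/hooks/" f then "hooks"
  else if PySem.Str.isIn "/pages/" f then "pages"
  else if PySem.Str.isIn "/lib/" f || PySem.Str.isIn "/utils/" f then "utils"
  else "unknown"

def infer_frontend_layers_alt (files : List String) : List (String × List String) :=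
  ["ui", "hooks", "pages", "utils", "unknown"].map
    (fun name => (name, files.filter (fun f => pvBucket f == name)))

-- ===== PRECONDITION & SPEC =====
def Spec_infer_frontend_layers (files : List String) (out : List (String × List String)) : Prop := out = infer_frontend_layers_alt files
instance (files : List String) (out : List (String × List String)) : Decidable (Spec_infer_frontend_layers files out) := by unfold Spec_infer_frontend_layers; infer_instance

-- ===== CLAIM (what is proved, stated in full; the proofs are below) =====
def Claim_equal_infer_frontend_layers : Prop := ∀ (files : List String), Dom_infer_frontend_layers files → Spec_infer_frontend_layers files (infer_frontend_layers files)

-- ===== LEMMAS AND PROOFS =====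

-- The shape of A's accumulator: all five keys, in creation order.
def mkD (u h p t k : List String) : PySem.Dict String (List String) :=
  PySem.Dict.mk [("ui", u), ("hooks", h), ("pages", p), ("utils", t), ("unknown", k)]

theorem pv_mod_ui (u h p t k : List String) (f : String) :
    (mkD u h p t k).modify "ui" [] (· ++ [f]) = mkD (u ++ [f]) h p t k := by
  simp [mkD, PySem.Dict.modify, PySem.Dict.insert, PySem.Dict.getD, PySem.Dict.get?, PySem.Dict.contains]

theorem pv_mod_hooks (u h p t k : List String) (f : String) :
    (mkD u h p t k).modify "hooks" [] (· ++ [f]) = mkD u (h ++ [f]) p t k := by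
  simp [mkD, PySem.Dict.modify, PySem.Dict.insert, PySem.Dict.getD, PySem.Dict.get?, PySem.Dict.contains]

theorem pv_mod_pages (u h p t k : List String) (f : String) :
    (mkD u h p t k).modify "pages" [] (· ++ [f]) = mkD u h (p ++ [f]) t k := by
  simp [mkD, PySem.Dict.modify, PySem.Dict.insert, PySem.Dict.getD, PySem.Dict.get?, PySem.Dict.contains]

theorem pv_mod_utils (u h p t k : List String) (f : String) :
    (mkD u h p t k).modify "utils" [] (· ++ [f]) = mkD u h p (t ++ [f]) k := by
  simp [mkD, PySem.Dict.modify, PySem.Dict.insert, PySem.Dict.getD, PySem.Dict.get?, PySem.Dict.contains]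

theorem pv_mod_unknown (u h p t k : List String) (f : String) :
    (mkD u h p t k).modify "unknown" [] (· ++ [f]) = mkD u h p t (k ++ [f]) := by
  simp [mkD, PySem.Dict.modify, PySem.Dict.insert, PySem.Dict.getD, PySem.Dict.get?, PySem.Dict.contains]

-- Loop invariant: A's fold over l extends each bucket by the files of l that pvBucket sends there.
theorem pv_inv (l : List String) (u h p t k : List String) :
    l.foldl (fun layers f =>
      if PySem.Str.isIn "/ui/" f || PySem.Str.isIn "/components/" f then
        layers.modify "ui" [] (· ++ [f])
      else if PySem.Str.isIn "/hooks/" f then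
        layers.modify "hooks" [] (· ++ [f])
      else if PySem.Str.isIn "/pages/" f then
        layers.modify "pages" [] (· ++ [f])
      else if PySem.Str.isIn "/lib/" f || PySem.Str.isIn "/utils/" f then
        layers.modify "utils" [] (· ++ [f])
      else
        layers.modify "unknown" [] (· ++ [f])) (mkD u h p t k) =
    mkD (u ++ l.filter (fun f => pvBucket f == "ui"))
        (h ++ l.filter (fun f => pvBucket f == "hooks"))
        (p ++ l.filter (fun f => pvBucket f == "pages"))
        (t ++ l.filter (fun f => pvBucket f == "utils"))
        (k ++ l.filter (fun f => pvBucket f == "unknown")) := by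
  induction l generalizing u h p t k with
  | nil => simp
  | cons x xs ih =>
    simp only [List.foldl_cons, List.filter_cons]
    by_cases h1 : (PySem.Str.isIn "/ui/" x || PySem.Str.isIn "/components/" x) = true
    · have hb : pvBucket x = "ui" := by simp only [pvBucket, h1, if_true]
      rw [if_pos h1, pv_mod_ui, ih]
      simp [hb, mkD]
    · rw [Bool.not_eq_true] at h1
      by_cases h2 : PySem.Str.isIn "/hooks/" x = true
      · have n1 : ¬ ((PySem.Str.isIn "/ui/" x || PySem.Str.isIn "/components/" x) = true) := by rw [h1]; simp
        have hb : pvBucket x = "hooks" := by simp only [pvBucket, h1, h2, if_true, if_false, Bool.false_eq_true]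
        rw [if_neg n1, if_pos h2, pv_mod_hooks, ih]
        simp [hb, mkD]
      · rw [Bool.not_eq_true] at h2
        by_cases h3 : PySem.Str.isIn "/pages/" x = true
        · have n1 : ¬ ((PySem.Str.isIn "/ui/" x || PySem.Str.isIn "/components/" x) = true) := by rw [h1]; simp
          have n2 : ¬ (PySem.Str.isIn "/hooks/" x = true) := by rw [h2]; simp
          have hb : pvBucket x = "pages" := by simp only [pvBucket, h1, h2, h3, if_true, if_false, Bool.false_eq_true]
          rw [if_neg n1, if_neg n2, if_pos h3, pv_mod_pages, ih]
          simp [hb, mkD]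
        · rw [Bool.not_eq_true] at h3
          by_cases h4 : (PySem.Str.isIn "/lib/" x || PySem.Str.isIn "/utils/" x) = true
          · have n1 : ¬ ((PySem.Str.isIn "/ui/" x || PySem.Str.isIn "/components/" x) = true) := by rw [h1]; simp
            have n2 : ¬ (PySem.Str.isIn "/hooks/" x = true) := by rw [h2]; simp
            have n3 : ¬ (PySem.Str.isIn "/pages/" x = true) := by rw [h3]; simp
            have hb : pvBucket x = "utils" := by simp only [pvBucket, h1, h2, h3, h4, if_true, if_false, Bool.false_eq_true]
            rw [if_neg n1, if_neg n2, if_neg n3, if_pos h4, pv_mod_utils, ih]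
            simp [hb, mkD]
          · rw [Bool.not_eq_true] at h4
            have n1 : ¬ ((PySem.Str.isIn "/ui/" x || PySem.Str.isIn "/components/" x) = true) := by rw [h1]; simp
            have n2 : ¬ (PySem.Str.isIn "/hooks/" x = true) := by rw [h2]; simp
            have n3 : ¬ (PySem.Str.isIn "/pages/" x = true) := by rw [h3]; simp
            have n4 : ¬ ((PySem.Str.isIn "/lib/" x || PySem.Str.isIn "/utils/" x) = true) := by rw [h4]; simp
            have hb : pvBucket x = "unknown" := by simp only [pvBucket, h1, h2, h3, h4, if_true, if_false, Bool.false_eq_true]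
            rw [if_neg n1, if_neg n2, if_neg n3, if_neg n4, pv_mod_unknown, ih]
            simp [hb, mkD]

-- ===== VERDICT (by name: the statement is the Claim_ definition above) =====
theorem infer_frontend_layers_spec : Claim_equal_infer_frontend_layers := by
  intro files _
  show _ = _
  unfold infer_frontend_layers infer_frontend_layers_alt
  have h0 : PySem.Dict.ofList [("ui", ([] : List String)), ("hooks", []), ("pages", []), ("utils", []), ("unknown", [])] = mkD [] [] [] [] [] := by decide
  rw [h0, pv_inv]
  simp [mkD, List.map]
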